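-- pv_equiv track=rewrite | github.com/dangerousxd/python-labs | laba6/main.py | pythonic_partition
-- ===== SOURCE A (Python) =====
-- from itertools import combinations
--
-- def pythonic_partition(group):
--     results = []
--     for first_team in combinations(group, 3):
--         remaining1 = [x for x in group if x not in first_team]
--         for second_team in combinations(remaining1, 5):
--             third_team = [x for x in remaining1 if x not in second_team]
--             results.append((list(first_team), list(second_team), third_team))
--     return results
-- ===== SOURCE B (Python) =====
-- from itertools import combinations
--
-- def pythonic_partition(group):
--     def parts(items, sizes):
--         if not sizes:
--             return [[items]]
--         res = []
--         for team in combinations(items, sizes[0]):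
--             rest = [x for x in items if x not in team]
--             for tail in parts(rest, sizes[1:]):
--                 res.append([list(team)] + tail)
--         return res
--     return [(p[0], p[1], p[2]) for p in parts(list(group), [3, 5])]
-- ===== Notes on version B (the rewrite author's own statement) =====
-- stated objective: alternative
-- what changed: Replaces the two hard-coded nested combination loops by one recursive helper that partitions a list according to an arbitrary list of team sizes (last block = the remainder), called here with team sizes 3 and 5.
import Mathlib
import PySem

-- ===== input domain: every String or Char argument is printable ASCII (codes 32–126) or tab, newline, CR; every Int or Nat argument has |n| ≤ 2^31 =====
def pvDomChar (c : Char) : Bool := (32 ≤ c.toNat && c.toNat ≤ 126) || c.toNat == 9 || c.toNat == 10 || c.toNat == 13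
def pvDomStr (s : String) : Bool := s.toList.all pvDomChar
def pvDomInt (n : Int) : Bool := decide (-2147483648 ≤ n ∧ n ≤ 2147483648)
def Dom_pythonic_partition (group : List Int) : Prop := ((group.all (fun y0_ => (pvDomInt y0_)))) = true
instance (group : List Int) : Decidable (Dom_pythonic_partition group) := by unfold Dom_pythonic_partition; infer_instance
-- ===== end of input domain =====

-- B replaces A's two hard-coded nested combination loops by one recursive helper that
-- partitions a list by an arbitrary list of team sizes (alternative decomposition, same cost).


-- ===== PORT A =====
-- itertools.combinations(l, k): k-element subsequences in lexicographic index order (exact)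
def pvCombos : Nat → List Int → List (List Int)
  | 0, _ => [[]]
  | _ + 1, [] => []
  | k + 1, x :: xs => (pvCombos k xs).map (fun c => x :: c) ++ pvCombos (k + 1) xs

def pythonic_partition (group : List Int) : List (List Int × List Int × List Int) :=
  (pvCombos 3 group).foldl (fun results first_team =>
    let remaining1 := group.filter (fun x => !(first_team.contains x))
    (pvCombos 5 remaining1).foldl (fun results second_team =>
      let third_team := remaining1.filter (fun x => !(second_team.contains x))
      results ++ [(first_team, second_team, third_team)]) results) []

-- ===== PORT B =====
def pvParts : List Int → List Nat → List (List (List Int))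
  | items, [] => [[items]]
  | items, s :: rest =>
    (pvCombos s items).foldl (fun res team =>
      let remaining := items.filter (fun x => !(team.contains x))
      (pvParts remaining rest).foldl (fun res tail => res ++ [team :: tail]) res) []

def pythonic_partition_alt (group : List Int) : List (List Int × List Int × List Int) :=
  (pvParts group [3, 5]).map (fun p => (p.getD 0 [], p.getD 1 [], p.getD 2 []))

-- ===== PRECONDITION & SPEC =====
def Spec_pythonic_partition (group : List Int) (out : List (List Int × List Int × List Int)) : Prop := out = pythonic_partition_alt group
instance (group : List Int) (out : List (List Int × List Int × List Int)) : Decidable (Spec_pythonic_partition group out) := by unfold Spec_pythonic_partition; infer_instance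

-- ===== CLAIM (what is proved, stated in full; the proofs are below) =====
def Claim_equal_pythonic_partition : Prop := ∀ (group : List Int), Dom_pythonic_partition group → Spec_pythonic_partition group (pythonic_partition group)

-- ===== LEMMAS AND PROOFS =====

theorem pvFoldlNested {α β γ : Type} (l : List α) (h : α → List β) (g : α → β → γ)
    (acc : List γ) :
    l.foldl (fun r t => (h t).foldl (fun r s => r ++ [g t s]) r) acc
      = acc ++ l.flatMap (fun t => (h t).map (g t)) := by
  simp only [PySem.List.foldl_append_singleton_eq_map, PySem.List.foldl_append_eq_flatMap]

theorem pvFlattenSingleton {α β : Type} (l : List α) (f : α → β) :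
    (l.map (fun x => [f x])).flatten = l.map f := by
  induction l with
  | nil => rfl
  | cons x xs ih => simp [ih]

theorem pvParts_cons (items : List Int) (s : Nat) (rest : List Nat) :
    pvParts items (s :: rest) =
      (pvCombos s items).flatMap (fun team =>
        (pvParts (items.filter (fun x => !(team.contains x))) rest).map (fun tail => team :: tail)) := by
  show (pvCombos s items).foldl _ [] = _
  rw [pvFoldlNested (pvCombos s items)
    (fun team => pvParts (items.filter (fun x => !(team.contains x))) rest)
    (fun team tail => team :: tail)]
  simp

theorem pythonic_partition_spec_aux (group : List Int) :
    pythonic_partition group = pythonic_partition_alt group := by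
  unfold pythonic_partition pythonic_partition_alt
  rw [pvFoldlNested (pvCombos 3 group)
    (fun t => pvCombos 5 (group.filter (fun x => !(t.contains x))))
    (fun t s => (t, s, (group.filter (fun x => !(t.contains x))).filter (fun x => !(s.contains x))))]
  rw [pvParts_cons]
  simp only [List.map_flatMap, List.map_map, List.nil_append]
  refine List.flatMap_congr (fun t1 _ => ?_)
  rw [pvParts_cons]
  simp [pvParts, List.flatMap_def, Function.comp_def, pvFlattenSingleton]

-- ===== VERDICT (by name: the statement is the Claim_ definition above) =====
theorem pythonic_partition_spec : Claim_equal_pythonic_partition := by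
  intro group _
  exact pythonic_partition_spec_aux group
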